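-- pv_equiv track=rewrite | github.com/Naphat-Khoprasertthaworn/algo-python | a60_q1_number1.py | process
-- ===== SOURCE A (Python) =====
-- def process(n,left,right,l,r):
--     mid = (left+right)//2
--     if n<=1:
--         if(mid >= l and mid <= r):
--             return n
--         else:
--             return 0
--
--
--     if mid < l:
--         sRight = process(n//2,mid+1,right,l,r)
--         sLeft = 0
--     elif mid > r:
--         sLeft = process(n//2,left,mid,l,r)
--         sRight = 0
--     else:
--         sLeft = process(n//2,left,mid,l,r)
--         sRight = process(n//2,mid+1,right,l,r)
--
--     if mid >= l and mid <= r: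
--         return sLeft + sRight + (n%2)
--     else:
--         return sLeft + sRight
-- ===== SOURCE B (Python) =====
-- def process(n, left, right, l, r):
--     # Prefix-sum decomposition: the answer over [l, r] is prefix(r) - prefix(l-1),
--     # where prefix(x) walks ONE root-to-leaf path iteratively, adding the whole
--     # left-subtree total (n//2) plus the node value (n%2) whenever it steps right.
--     if r < l:
--         return 0
--
--     def prefix(x):
--         nn, lo, hi, acc = n, left, right, 0
--         while True:
--             if x >= hi:
--                 return acc + nn
--             if nn <= 1:
--                 return acc + (nn if (lo + hi) // 2 <= x else 0)
--             mid = (lo + hi) // 2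
--             if x < mid:
--                 nn, hi = nn // 2, mid
--             else:
--                 acc += nn // 2 + nn % 2
--                 nn, lo = nn // 2, mid + 1
--
--     return prefix(r) - prefix(l - 1)
-- ===== Notes on version B (the rewrite author's own statement) =====
-- stated objective: alternative
-- what changed: B replaces A's recursive descent into every node overlapping [l,r] by a prefix-sum decomposition: the answer is prefix(r) - prefix(l-1), where prefix(x) is computed by a single iterative root-to-leaf walk with an accumulator that adds the whole left-subtree total n//2 plus the node value n%2 on each step right, so only two root-to-leaf paths are traversed.
-- outside the precondition, e.g. on process(-3, -2, -4, -3, -3): A returns -3, B returns 0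
import Mathlib
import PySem

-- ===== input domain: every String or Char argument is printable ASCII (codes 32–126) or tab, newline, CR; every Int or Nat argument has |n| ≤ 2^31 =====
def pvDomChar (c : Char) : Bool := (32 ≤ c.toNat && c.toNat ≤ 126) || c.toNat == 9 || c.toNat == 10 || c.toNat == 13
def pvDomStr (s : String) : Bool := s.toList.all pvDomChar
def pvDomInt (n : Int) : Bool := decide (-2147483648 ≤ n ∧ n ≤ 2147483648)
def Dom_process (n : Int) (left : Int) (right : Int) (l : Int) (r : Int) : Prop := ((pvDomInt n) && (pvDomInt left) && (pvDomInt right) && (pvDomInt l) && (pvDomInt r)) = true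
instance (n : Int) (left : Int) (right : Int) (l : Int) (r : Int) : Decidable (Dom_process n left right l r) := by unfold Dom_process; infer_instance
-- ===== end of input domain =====

-- B replaces A's descent into every node overlapping [l,r] by the prefix-sum
-- decomposition prefix(r) - prefix(l-1), each prefix computed by one iterative
-- root-to-leaf walk with an accumulator (objective: alternative algorithm).

-- termination helper for both ports: n//2 shrinks n.toNat when 1 < n
theorem pvHalf_lt (n : Int) (h : ¬ n ≤ 1) : (PySem.Int.floordiv n 2).toNat < n.toNat := by
  rw [PySem.Int.floordiv_eq_ediv_of_pos (by omega : (0:Int) < 2)]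
  omega

-- ===== PORT A =====
def process (n : Int) (left : Int) (right : Int) (l : Int) (r : Int) : Int :=
  let mid := PySem.Int.floordiv (left + right) 2
  if n ≤ 1 then
    if mid ≥ l ∧ mid ≤ r then n else 0
  else
    let s : Int × Int :=   -- (sLeft, sRight)
      if mid < l then
        (0, process (PySem.Int.floordiv n 2) (mid + 1) right l r)
      else if mid > r then
        (process (PySem.Int.floordiv n 2) left mid l r, 0)
      else
        (process (PySem.Int.floordiv n 2) left mid l r,
         process (PySem.Int.floordiv n 2) (mid + 1) right l r)
    if mid ≥ l ∧ mid ≤ r then s.1 + s.2 + PySem.Int.mod n 2 else s.1 + s.2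
termination_by n.toNat
decreasing_by all_goals exact pvHalf_lt n (by assumption)

-- ===== PORT B =====
-- the while loop of Source B's `prefix`, state (nn, lo, hi, acc), as tail recursion
def pvPrefixLoop (x : Int) (nn : Int) (lo : Int) (hi : Int) (acc : Int) : Int :=
  if x ≥ hi then acc + nn
  else if nn ≤ 1 then
    acc + (if PySem.Int.floordiv (lo + hi) 2 ≤ x then nn else 0)
  else
    let mid := PySem.Int.floordiv (lo + hi) 2
    if x < mid then
      pvPrefixLoop x (PySem.Int.floordiv nn 2) lo mid acc
    else
      pvPrefixLoop x (PySem.Int.floordiv nn 2) (mid + 1) hi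
        (acc + PySem.Int.floordiv nn 2 + PySem.Int.mod nn 2)
termination_by nn.toNat
decreasing_by all_goals exact pvHalf_lt nn (by assumption)

def process_alt (n : Int) (left : Int) (right : Int) (l : Int) (r : Int) : Int :=
  if r < l then 0
  else pvPrefixLoop r n left right 0 - pvPrefixLoop (l - 1) n left right 0

-- ===== PRECONDITION & SPEC =====
-- Pre_ excludes degenerate empty node ranges left > right: there A's recursion
-- wanders over an interval that does not contain its midpoints, an accidental
-- artefact a prefix-difference query has no reason to reproduce.
def Pre_process (n : Int) (left : Int) (right : Int) (l : Int) (r : Int) : Prop := left ≤ right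
instance (n : Int) (left : Int) (right : Int) (l : Int) (r : Int) : Decidable (Pre_process n left right l r) := by unfold Pre_process; infer_instance
def pvWitness_process : Int × Int × Int × Int × Int := (6, 0, 7, 2, 5)

def Spec_process (n : Int) (left : Int) (right : Int) (l : Int) (r : Int) (out : Int) : Prop := out = process_alt n left right l r
instance (n : Int) (left : Int) (right : Int) (l : Int) (r : Int) (out : Int) : Decidable (Spec_process n left right l r out) := by unfold Spec_process; infer_instance

-- ===== CLAIM (what is proved, stated in full; the proofs are below) =====
def Claim_equal_process : Prop := ∀ (n : Int) (left : Int) (right : Int) (l : Int) (r : Int), Dom_process n left right l r → Pre_process n left right l r → Spec_process n left right l r (process n left right l r)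

-- ===== LEMMAS AND PROOFS =====

-- "POk left right": the shapes of node ranges reachable from a non-degenerate root
def POk (left right : Int) : Prop := left ≤ right ∨ left = right + 1

theorem pv_mid_bounds (left right : Int) (h : POk left right) :
    min left right ≤ PySem.Int.floordiv (left + right) 2 ∧
    PySem.Int.floordiv (left + right) 2 ≤ right := by
  rw [PySem.Int.floordiv_eq_ediv_of_pos (by omega : (0:Int) < 2)]
  unfold POk at h; omega

-- every node of a fully-covered subtree contributes fully, so the subtree sums to n
theorem pv_inside : ∀ (k : Nat) (n left right l r : Int), n.toNat ≤ k →
    POk left right → l ≤ min left right → right ≤ r →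
    process n left right l r = n := by
  intro k
  induction k with
  | zero =>
    intro n left right l r hk hok hl hr
    rw [process]
    have hm := pv_mid_bounds left right hok
    have hn : n ≤ 1 := by omega
    simp only [hn, if_true]
    split
    · rfl
    · omega
  | succ k ih =>
    intro n left right l r hk hok hl hr
    rw [process]
    have hm := pv_mid_bounds left right hok
    set mid := PySem.Int.floordiv (left + right) 2 with hmid
    by_cases hn : n ≤ 1
    · simp only [hn, if_true]
      split
      · rfl
      · omega
    · simp only [hn, if_false]
      have hin : mid ≥ l ∧ mid ≤ r := by omega
      have h1 : ¬ mid < l := by omega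
      have h2 : ¬ mid > r := by omega
      simp only [h1, h2, if_false, hin, and_self, if_true]
      have hk' : (PySem.Int.floordiv n 2).toNat ≤ k := by
        have := pvHalf_lt n hn; omega
      have hokL : POk left mid := by unfold POk at hok ⊢; omega
      have hokR : POk (mid + 1) right := by unfold POk at hok ⊢; omega
      show process (PySem.Int.floordiv n 2) left mid l r
            + process (PySem.Int.floordiv n 2) (mid + 1) right l r
            + PySem.Int.mod n 2 = n
      rw [ih _ left mid l r hk' hokL (by unfold POk at hok; omega) (by omega),
          ih _ (mid + 1) right l r hk' hokR (by unfold POk at hok; omega) (by omega)]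
      have := PySem.Int.floordiv_mul_add_mod n 2
      omega

-- a subtree disjoint from [l,r] contributes nothing
theorem pv_disjoint : ∀ (k : Nat) (n left right l r : Int), n.toNat ≤ k →
    POk left right → (r < min left right ∨ right < l ∨ r < l) →
    process n left right l r = 0 := by
  intro k
  induction k with
  | zero =>
    intro n left right l r hk hok hd
    rw [process]
    have hm := pv_mid_bounds left right hok
    have hn : n ≤ 1 := by omega
    simp only [hn, if_true]
    split
    · omega
    · rfl
  | succ k ih =>
    intro n left right l r hk hok hd
    rw [process]
    have hm := pv_mid_bounds left right hok
    set mid := PySem.Int.floordiv (left + right) 2 with hmid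
    by_cases hn : n ≤ 1
    · simp only [hn, if_true]
      split
      · omega
      · rfl
    · simp only [hn, if_false]
      have hk' : (PySem.Int.floordiv n 2).toNat ≤ k := by
        have := pvHalf_lt n hn; omega
      have hout : ¬ (mid ≥ l ∧ mid ≤ r) := by omega
      have hokL : POk left mid := by unfold POk at hok ⊢; omega
      have hokR : POk (mid + 1) right := by unfold POk at hok ⊢; omega
      by_cases h1 : mid < l
      · simp only [h1, if_true, hout, if_false]
        show (0 : Int) + process (PySem.Int.floordiv n 2) (mid + 1) right l r = 0
        rw [ih _ (mid + 1) right l r hk' hokR (by unfold POk at hok; omega)]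
        omega
      · by_cases h2 : mid > r
        · simp only [h1, if_false, h2, if_true, hout]
          show process (PySem.Int.floordiv n 2) left mid l r + (0 : Int) = 0
          rw [ih _ left mid l r hk' hokL (by unfold POk at hok; omega)]
          omega
        · omega

-- evaluation lemmas for A's recursion, one per branch
theorem pv_leaf (n lo hi : Int) (hn : n ≤ 1) (l r : Int) :
    process n lo hi l r =
      (if PySem.Int.floordiv (lo + hi) 2 ≥ l ∧ PySem.Int.floordiv (lo + hi) 2 ≤ r then n else 0) := by
  rw [process]; simp only [hn, if_true]

theorem pv_step_right (n lo hi l r : Int) (hn : ¬ n ≤ 1)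
    (h : PySem.Int.floordiv (lo + hi) 2 < l) :
    process n lo hi l r
      = process (PySem.Int.floordiv n 2) (PySem.Int.floordiv (lo + hi) 2 + 1) hi l r := by
  rw [process]
  simp only [hn, if_false, h, if_true,
    show ¬ (PySem.Int.floordiv (lo + hi) 2 ≥ l ∧ PySem.Int.floordiv (lo + hi) 2 ≤ r) by omega,
    if_false]
  show (0 : Int) + _ = _
  rw [zero_add]

theorem pv_step_left (n lo hi l r : Int) (hn : ¬ n ≤ 1)
    (h0 : ¬ PySem.Int.floordiv (lo + hi) 2 < l)
    (h : PySem.Int.floordiv (lo + hi) 2 > r) :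
    process n lo hi l r
      = process (PySem.Int.floordiv n 2) lo (PySem.Int.floordiv (lo + hi) 2) l r := by
  rw [process]
  simp only [hn, if_false, h0, h, if_true,
    show ¬ (PySem.Int.floordiv (lo + hi) 2 ≥ l ∧ PySem.Int.floordiv (lo + hi) 2 ≤ r) by omega,
    if_false]
  show _ + (0 : Int) = _
  rw [add_zero]

theorem pv_step_both (n lo hi l r : Int) (hn : ¬ n ≤ 1)
    (h1 : l ≤ PySem.Int.floordiv (lo + hi) 2) (h2 : PySem.Int.floordiv (lo + hi) 2 ≤ r) :
    process n lo hi l r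
      = process (PySem.Int.floordiv n 2) lo (PySem.Int.floordiv (lo + hi) 2) l r
        + process (PySem.Int.floordiv n 2) (PySem.Int.floordiv (lo + hi) 2 + 1) hi l r
        + PySem.Int.mod n 2 := by
  rw [process]
  simp only [hn, if_false, show ¬ PySem.Int.floordiv (lo + hi) 2 < l by omega,
    show ¬ PySem.Int.floordiv (lo + hi) 2 > r by omega, if_false,
    show PySem.Int.floordiv (lo + hi) 2 ≥ l ∧ PySem.Int.floordiv (lo + hi) 2 ≤ r
      from ⟨h1, h2⟩, and_self, if_true]

-- prefix split: A's sum over [l', r] splits at l (for l' below every midpoint)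
theorem pv_split : ∀ (k : Nat) (n lo hi l r l' : Int), n.toNat ≤ k →
    POk lo hi → l' ≤ min lo hi → l ≤ r + 1 →
    process n lo hi l' r = process n lo hi l' (l - 1) + process n lo hi l r := by
  intro k
  induction k with
  | zero =>
    intro n lo hi l r l' hk hok hl' hlr
    have hm := pv_mid_bounds lo hi hok
    have hn : n ≤ 1 := by omega
    rw [pv_leaf n lo hi hn, pv_leaf n lo hi hn, pv_leaf n lo hi hn]
    split_ifs <;> omega
  | succ k ih =>
    intro n lo hi l r l' hk hok hl' hlr
    have hm := pv_mid_bounds lo hi hok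
    set mid := PySem.Int.floordiv (lo + hi) 2 with hmid
    by_cases hn : n ≤ 1
    · rw [pv_leaf n lo hi hn, pv_leaf n lo hi hn, pv_leaf n lo hi hn]
      split_ifs <;> omega
    · have hk' : (PySem.Int.floordiv n 2).toNat ≤ k := by
        have := pvHalf_lt n hn; omega
      have hokL : POk lo mid := by unfold POk at hok ⊢; omega
      have hokR : POk (mid + 1) hi := by unfold POk at hok ⊢; omega
      have hl'L : l' ≤ min lo mid := by omega
      have hl'R : l' ≤ min (mid + 1) hi := by omega
      by_cases hc1 : mid ≤ l - 1
      · -- node midpoint left of [l,r]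
        rw [pv_step_both n lo hi l' r hn (by omega) (by omega),
            pv_step_both n lo hi l' (l - 1) hn (by omega) (by omega),
            pv_step_right n lo hi l r hn (by omega)]
        have hL := ih (PySem.Int.floordiv n 2) lo mid l r l' hk' hokL hl'L hlr
        have hLz := pv_disjoint k (PySem.Int.floordiv n 2) lo mid l r hk' hokL (by omega)
        have hR := ih (PySem.Int.floordiv n 2) (mid + 1) hi l r l' hk' hokR hl'R hlr
        rw [← hmid]
        omega
      · by_cases hc2 : mid ≤ r
        · -- node midpoint inside [l,r]
          rw [pv_step_both n lo hi l' r hn (by omega) hc2,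
              pv_step_left n lo hi l' (l - 1) hn (by omega) (by omega),
              pv_step_both n lo hi l r hn (by omega) hc2]
          have hL := ih (PySem.Int.floordiv n 2) lo mid l r l' hk' hokL hl'L hlr
          have hR := ih (PySem.Int.floordiv n 2) (mid + 1) hi l r l' hk' hokR hl'R hlr
          have hRz := pv_disjoint k (PySem.Int.floordiv n 2) (mid + 1) hi l' (l - 1) hk' hokR (by omega)
          rw [← hmid]
          omega
        · -- node midpoint right of [l,r]
          rw [pv_step_left n lo hi l' r hn (by omega) (by omega),
              pv_step_left n lo hi l' (l - 1) hn (by omega) (by omega),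
              pv_step_left n lo hi l r hn (by omega) (by omega)]
          have hL := ih (PySem.Int.floordiv n 2) lo mid l r l' hk' hokL hl'L hlr
          rw [← hmid]
          omega

-- B's loop computes A's prefix sum: pvPrefixLoop x n lo hi acc = acc + process n lo hi l x
theorem pv_prefix : ∀ (k : Nat) (n lo hi x acc l : Int), n.toNat ≤ k →
    lo ≤ hi → l ≤ lo →
    pvPrefixLoop x n lo hi acc = acc + process n lo hi l x := by
  intro k
  induction k with
  | zero =>
    intro n lo hi x acc l hk hlohi hl
    have hok : POk lo hi := Or.inl hlohi
    have hm := pv_mid_bounds lo hi hok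
    have hn : n ≤ 1 := by omega
    rw [pvPrefixLoop]
    by_cases hx : x ≥ hi
    · simp only [hx, if_true]
      rw [pv_inside 0 n lo hi l x hk hok (by omega) (by omega)]
    · simp only [hx, if_false, hn, if_true]
      rw [pv_leaf n lo hi hn]
      split_ifs <;> omega
  | succ k ih =>
    intro n lo hi x acc l hk hlohi hl
    have hok : POk lo hi := Or.inl hlohi
    have hm := pv_mid_bounds lo hi hok
    rw [pvPrefixLoop]
    by_cases hx : x ≥ hi
    · simp only [hx, if_true]
      rw [pv_inside (k + 1) n lo hi l x hk hok (by omega) (by omega)]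
    · by_cases hn : n ≤ 1
      · simp only [hx, if_false, hn, if_true]
        rw [pv_leaf n lo hi hn]
        split_ifs <;> omega
      · have hk' : (PySem.Int.floordiv n 2).toNat ≤ k := by
          have := pvHalf_lt n hn; omega
        simp only [hx, if_false, hn, if_false]
        set mid := PySem.Int.floordiv (lo + hi) 2 with hmid
        have hmlo : lo ≤ mid := by omega
        by_cases hxm : x < mid
        · simp only [hxm, if_true]
          rw [pv_step_left n lo hi l x hn (by omega) (by omega)]
          exact ih (PySem.Int.floordiv n 2) lo mid x acc l hk' hmlo hl
        · have hmhi : mid < hi := by omega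
          simp only [hxm, if_false]
          rw [pv_step_both n lo hi l x hn (by omega) (by omega)]
          rw [ih (PySem.Int.floordiv n 2) (mid + 1) hi x
                (acc + PySem.Int.floordiv n 2 + PySem.Int.mod n 2) l hk' (by omega) (by omega)]
          rw [pv_inside (k + 1) (PySem.Int.floordiv n 2) lo mid l x (by omega)
                (Or.inl hmlo) (by omega) (by omega)]
          ring

-- ===== VERDICT (by name: the statement is the Claim_ definition above) =====
theorem process_spec : Claim_equal_process := by
  intro n left right l r _ hpre
  have hlr : left ≤ right := hpre
  unfold Spec_process process_alt
  by_cases hrl : r < l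
  · simp only [hrl, if_true]
    exact pv_disjoint n.toNat n left right l r le_rfl (Or.inl hlr) (by omega)
  · simp only [hrl, if_false]
    rw [pv_prefix n.toNat n left right r 0 left le_rfl hlr le_rfl,
        pv_prefix n.toNat n left right (l - 1) 0 left le_rfl hlr le_rfl,
        pv_split n.toNat n left right l r left le_rfl (Or.inl hlr) (by omega) (by omega)]
    ring
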